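-- pv_equiv track=rewrite | github.com/franciscogneto/RapidTransportBack | rapidtransport/rt/regularizadores/auxiliar.py | regulariza_veiculo
-- ===== SOURCE A (Python) =====
-- def regulariza_veiculo(modelo: str,cor: str,placa: str,):
--     modelo = modelo.replace(' ','')
--     cor = cor.replace(' ','')
--     placa = placa.replace(' ','')
--     placa = placa.upper()
--     i = 0
--     if(modelo.__len__() > 0):
--         if(cor.__len__() > 2):
--             if(placa[3] == '-'):
--                 while(i < placa.__len__()):
--                     if(i < 3):
--                         if( not(placa[i] >= 'A' and placa[i] <= 'Z')):
--                             return False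
--                     if(i > 3):
--                         if(not(placa[i] >= '0' and placa[i] <= '9')):
--                             return False
--                     i+=1
--             else:
--                 return False
--     return True
-- ===== SOURCE B (Python) =====
-- def regulariza_veiculo(modelo: str, cor: str, placa: str):
--     modelo = modelo.replace(' ', '')
--     cor = cor.replace(' ', '')
--     placa = placa.replace(' ', '').upper()
--     if not modelo or len(cor) <= 2:
--         return True
--     if len(placa) < 4 or placa[3] != '-':
--         return False
--     head, tail = placa[:3], placa[4:]
--     return head.isalpha() and (tail == '' or tail.isdigit())
-- ===== Notes on version B (the rewrite author's own statement) =====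
-- stated objective: idiomatic
-- what changed: Replaces the index-counting while loop that classifies each character by position with guard clauses plus whole-slice checks: placa[:3].isalpha() for the letter block and placa[4:].isdigit() (empty tail allowed) for the digit block.
import Mathlib
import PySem

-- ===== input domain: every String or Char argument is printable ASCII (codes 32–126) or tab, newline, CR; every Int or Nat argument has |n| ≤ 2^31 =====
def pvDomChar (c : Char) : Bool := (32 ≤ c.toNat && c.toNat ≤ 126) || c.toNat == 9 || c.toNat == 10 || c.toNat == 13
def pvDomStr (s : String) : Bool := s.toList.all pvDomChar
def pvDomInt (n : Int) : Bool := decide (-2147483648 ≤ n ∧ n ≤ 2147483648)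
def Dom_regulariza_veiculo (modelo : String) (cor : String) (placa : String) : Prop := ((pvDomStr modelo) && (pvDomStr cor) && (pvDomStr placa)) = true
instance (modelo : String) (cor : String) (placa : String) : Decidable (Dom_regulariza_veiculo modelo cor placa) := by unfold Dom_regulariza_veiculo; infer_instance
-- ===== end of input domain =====

-- B replaces A's index-counting while loop by guard clauses plus whole-slice isalpha/isdigit checks (idiomatic; same cost).
-- Where A raises IndexError (plate shorter than 4 after space removal, with nonempty model and colour longer than 2), B returns False; those inputs are outside Pre_.


-- ===== PORT A =====
-- A's while loop: index i runs over placa, letters required at i < 3, digits at i > 3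
def pvLoopA (p : List Char) (i : Nat) : Bool :=
  if h : i < p.length then
    let c := p[i]
    if i < 3 ∧ ¬('A' ≤ c ∧ c ≤ 'Z') then false
    else if 3 < i ∧ ¬('0' ≤ c ∧ c ≤ '9') then false
    else pvLoopA p (i + 1)
  else true
termination_by p.length - i

def regulariza_veiculo (modelo : String) (cor : String) (placa : String) : Bool :=
  let m := PySem.Chars.replace modelo.toList [' '] []
  let co := PySem.Chars.replace cor.toList [' '] []
  let p := PySem.Chars.upper (PySem.Chars.replace placa.toList [' '] [])
  if 0 < m.length then
    if 2 < co.length then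
      match PySem.List.pyGet? p 3 with
      | some ch => if ch = '-' then pvLoopA p 0 else false
      | none => false    -- Python raises IndexError here; excluded by Pre_
    else true
  else true

-- ===== PORT B =====
def regulariza_veiculo_alt (modelo : String) (cor : String) (placa : String) : Bool :=
  let m := PySem.Chars.replace modelo.toList [' '] []
  let co := PySem.Chars.replace cor.toList [' '] []
  let p := PySem.Chars.upper (PySem.Chars.replace placa.toList [' '] [])
  if m.length = 0 ∨ co.length ≤ 2 then true
  else if p.length < 4 ∨ ¬ p.getD 3 ' ' = '-' then false
  else
    let head := PySem.List.slice p none (some 3)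
    let tail := PySem.List.slice p (some 4) none
    PySem.Chars.strIsalpha head && (tail.isEmpty || PySem.Chars.strIsdigit tail)

-- ===== PRECONDITION & SPEC =====
-- Pre_ excludes exactly the inputs where A raises IndexError on placa[3]:
-- nonempty modelo, cor longer than 2 and placa shorter than 4 (all after removing spaces).
def Pre_regulariza_veiculo (modelo : String) (cor : String) (placa : String) : Prop :=
  (PySem.Chars.replace modelo.toList [' '] []).length = 0 ∨
  (PySem.Chars.replace cor.toList [' '] []).length ≤ 2 ∨
  4 ≤ (PySem.Chars.replace placa.toList [' '] []).length
instance (modelo : String) (cor : String) (placa : String) : Decidable (Pre_regulariza_veiculo modelo cor placa) := by unfold Pre_regulariza_veiculo; infer_instance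

def pvWitness_regulariza_veiculo : String × String × String := ("Gol", "red", "abc-123")

def Spec_regulariza_veiculo (modelo : String) (cor : String) (placa : String) (out : Bool) : Prop := out = regulariza_veiculo_alt modelo cor placa
instance (modelo : String) (cor : String) (placa : String) (out : Bool) : Decidable (Spec_regulariza_veiculo modelo cor placa out) := by unfold Spec_regulariza_veiculo; infer_instance

-- ===== CLAIM =====
def Claim_equal_regulariza_veiculo : Prop := ∀ (modelo : String) (cor : String) (placa : String), Dom_regulariza_veiculo modelo cor placa → Pre_regulariza_veiculo modelo cor placa → Spec_regulariza_veiculo modelo cor placa (regulariza_veiculo modelo cor placa)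
-- ===== LEMMAS AND PROOFS =====

lemma isalpha_upperChar (c : Char) :
    PySem.Chars.isalpha (PySem.Chars.upperChar c)
      = (decide ('A' ≤ PySem.Chars.upperChar c ∧ PySem.Chars.upperChar c ≤ 'Z')) := by
  unfold PySem.Chars.upperChar
  by_cases hl : PySem.Chars.islower c = true
  · simp only [hl, if_pos]
    have hc : ('a' : Char) ≤ c ∧ c ≤ 'z' := by
      simpa [PySem.Chars.islower] using hl
    have hlo : 97 ≤ c.toNat ∧ c.toNat ≤ 122 := by
      constructor <;> [exact hc.1; exact hc.2]
    have hv : (c.toNat - 32).isValidChar := Or.inl (by omega)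
    have ht : (Char.ofNat (c.toNat - 32)).toNat = c.toNat - 32 := by
      rw [Char.toNat_ofNat, if_pos hv]
    simp only [PySem.Chars.isalpha, PySem.Chars.isupper, PySem.Chars.islower]
    have h1 : ('A' : Char) ≤ Char.ofNat (c.toNat - 32) := by
      rw [Char.le_def, UInt32.le_iff_toNat_le]; show 65 ≤ _
      rw [show (Char.ofNat (c.toNat - 32)).val.toNat = (Char.ofNat (c.toNat - 32)).toNat from rfl, ht]; omega
    have h2 : Char.ofNat (c.toNat - 32) ≤ ('Z' : Char) := by
      rw [Char.le_def, UInt32.le_iff_toNat_le]; show _ ≤ 90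
      rw [show (Char.ofNat (c.toNat - 32)).val.toNat = (Char.ofNat (c.toNat - 32)).toNat from rfl, ht]; omega
    have h3 : ¬ ('a' : Char) ≤ Char.ofNat (c.toNat - 32) := by
      rw [Char.le_def, UInt32.le_iff_toNat_le]; show ¬ 97 ≤ _
      rw [show (Char.ofNat (c.toNat - 32)).val.toNat = (Char.ofNat (c.toNat - 32)).toNat from rfl, ht]; omega
    simp [h1, h2, h3]
  · simp only [hl, if_neg, Bool.not_eq_true]
    simp only [PySem.Chars.isalpha, PySem.Chars.isupper]
    rw [show PySem.Chars.islower c = false from by simpa using hl]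
    simp [hl]

lemma pvLoopA_iff (p : List Char) (i : Nat) :
    pvLoopA p i = true ↔
      ∀ j (h : j < p.length), i ≤ j →
        (j < 3 → ('A' ≤ p[j] ∧ p[j] ≤ 'Z')) ∧ (3 < j → ('0' ≤ p[j] ∧ p[j] ≤ '9')) := by
  induction i using pvLoopA.induct (p := p) with
  | case1 x h c hc1 =>
    have hc1' : x < 3 ∧ ¬('A' ≤ p[x] ∧ p[x] ≤ 'Z') := hc1
    rw [pvLoopA]
    simp only [dif_pos h]
    rw [if_pos hc1']
    simp only [Bool.false_eq_true, false_iff]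
    intro hall
    exact hc1'.2 ((hall x h le_rfl).1 hc1'.1)
  | case2 x h c hc1 hc2 =>
    have hc1' : ¬(x < 3 ∧ ¬('A' ≤ p[x] ∧ p[x] ≤ 'Z')) := hc1
    have hc2' : 3 < x ∧ ¬('0' ≤ p[x] ∧ p[x] ≤ '9') := hc2
    rw [pvLoopA]
    simp only [dif_pos h]
    rw [if_neg hc1', if_pos hc2']
    simp only [Bool.false_eq_true, false_iff]
    intro hall
    exact hc2'.2 ((hall x h le_rfl).2 hc2'.1)
  | case3 x h c hc1 hc2 ih =>
    have hc1' : ¬(x < 3 ∧ ¬('A' ≤ p[x] ∧ p[x] ≤ 'Z')) := hc1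
    have hc2' : ¬(3 < x ∧ ¬('0' ≤ p[x] ∧ p[x] ≤ '9')) := hc2
    rw [pvLoopA]
    simp only [dif_pos h]
    rw [if_neg hc1', if_neg hc2', ih]
    constructor
    · intro hall j hj hij
      rcases Nat.eq_or_lt_of_le hij with rfl | hlt
      · refine ⟨fun h3 => ?_, fun h3 => ?_⟩
        · by_contra hcon; exact hc1' ⟨h3, hcon⟩
        · by_contra hcon; exact hc2' ⟨h3, hcon⟩
      · exact hall j hj hlt
    · intro hall j hj hij
      exact hall j hj (Nat.le_of_succ_le hij)
  | case4 x h =>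
    rw [pvLoopA]
    simp only [dif_neg h, true_iff]
    intro j hj hij
    exact absurd (Nat.lt_of_le_of_lt hij hj) h

lemma all_take_iff (p : List Char) (k : Nat) (f : Char → Bool) :
    (p.take k).all f = true ↔ ∀ j (h : j < p.length), j < k → f p[j] := by
  rw [List.all_eq_true]
  constructor
  · intro hall j hj hk
    exact hall _ (by
      rw [List.mem_iff_getElem]
      exact ⟨j, by simp [hk, hj], by simp⟩)
  · intro hall x hx
    rw [List.mem_iff_getElem] at hx
    obtain ⟨j, hj, rfl⟩ := hx
    have hj' : j < p.length := Nat.lt_of_lt_of_le hj (by simp [List.length_take])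
    have hk : j < k := Nat.lt_of_lt_of_le hj (by simp [List.length_take])
    rw [List.getElem_take]
    exact hall j hj' hk

lemma all_drop_iff (p : List Char) (k : Nat) (f : Char → Bool) :
    (p.drop k).all f = true ↔ ∀ j (h : j < p.length), k ≤ j → f p[j] := by
  rw [List.all_eq_true]
  constructor
  · intro hall j hj hk
    have hlt : j - k < (p.drop k).length := by simp [List.length_drop]; omega
    have := hall _ (by
      rw [List.mem_iff_getElem]
      exact ⟨j - k, hlt, rfl⟩)
    simpa [List.getElem_drop, show k + (j - k) = j from by omega] using this
  · intro hall x hx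
    rw [List.mem_iff_getElem] at hx
    obtain ⟨j, hj, rfl⟩ := hx
    simp only [List.getElem_drop]
    exact hall (k + j) (by simp [List.length_drop] at hj; omega) (by omega)

lemma band_true {a b : Bool} : (a && b) = true ↔ a = true ∧ b = true := by simp
lemma bor_true {a b : Bool} : (a || b) = true ↔ a = true ∨ b = true := by simp

-- ===== VERDICT =====
theorem regulariza_veiculo_spec : Claim_equal_regulariza_veiculo := by
  unfold Claim_equal_regulariza_veiculo
  intro modelo cor placa _hdom hpre
  unfold Spec_regulariza_veiculo regulariza_veiculo regulariza_veiculo_alt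
  set l := PySem.Chars.replace placa.toList [' '] [] with hl
  set m := PySem.Chars.replace modelo.toList [' '] [] with hm
  set co := PySem.Chars.replace cor.toList [' '] [] with hco
  simp only []
  by_cases hm0 : m.length = 0
  · simp [hm0]
  · by_cases hco2 : co.length ≤ 2
    · simp [hco2, Nat.not_lt_of_le hco2, Nat.pos_of_ne_zero hm0]
    · -- Pre_ gives 4 ≤ l.length
      have hlen : 4 ≤ l.length := by
        rcases hpre with h | h | h
        · exact absurd h hm0
        · exact absurd h hco2
        · exact h
      have hplen : (PySem.Chars.upper l).length = l.length := by
        simp [PySem.Chars.upper]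
      set p := PySem.Chars.upper l with hp
      have hp4 : 3 < p.length := by omega
      have hget : PySem.List.pyGet? p 3 = some p[3] := by
        rw [show (3 : Int) = ((3 : Nat) : Int) from rfl, PySem.List.pyGet?_natCast]
        simp [hp4]
      have hgetD : p.getD 3 ' ' = p[3] := List.getD_eq_getElem p ' ' hp4
      rw [hget]
      rw [if_pos (Nat.pos_of_ne_zero hm0), if_pos (Nat.lt_of_not_le hco2),
          if_neg (show ¬(m.length = 0 ∨ co.length ≤ 2) from by push_neg; exact ⟨hm0, Nat.lt_of_not_le hco2⟩)]
      show (if p[3] = '-' then pvLoopA p 0 else false) = _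
      by_cases hdash : p[3] = '-'
      · rw [if_pos hdash, if_neg (show ¬(p.length < 4 ∨ ¬ p.getD 3 ' ' = '-') from by rw [hgetD]; push_neg; exact ⟨by omega, hdash⟩)]
        -- loop vs slice checks
        have hslice1 : PySem.List.slice p none (some 3) = p.take 3 := by
          rw [show (3 : Int) = ((3 : Nat) : Int) from rfl, PySem.List.slice_to_natCast]
        have hslice2 : PySem.List.slice p (some 4) none = p.drop 4 := by
          rw [show (4 : Int) = ((4 : Nat) : Int) from rfl, PySem.List.slice_from_natCast]
        rw [hslice1, hslice2]
        have htake_ne : ¬ (p.take 3).isEmpty := by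
          simp [List.isEmpty_iff, ← List.length_eq_zero_iff, List.length_take]
          omega
        have halpha : ∀ c ∈ p, PySem.Chars.isalpha c = decide ('A' ≤ c ∧ c ≤ 'Z') := by
          intro c hc
          rw [hp, PySem.Chars.upper] at hc
          obtain ⟨c', _, rfl⟩ := List.mem_map.mp hc
          exact isalpha_upperChar c'
        have hdig : ∀ c : Char, PySem.Chars.isdigit c = decide ('0' ≤ c ∧ c ≤ '9') := by
          intro c
          rw [PySem.Chars.isdigit]
          by_cases h1 : ('0' : Char) ≤ c <;> by_cases h2 : c ≤ ('9' : Char) <;> simp [h1, h2]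
        have main : pvLoopA p 0 = true ↔
            (PySem.Chars.strIsalpha (p.take 3)
              && ((p.drop 4).isEmpty || PySem.Chars.strIsdigit (p.drop 4))) = true := by
          rw [pvLoopA_iff]
          constructor
          · intro hall
            refine band_true.mpr ⟨?_, ?_⟩
            · rw [PySem.Chars.strIsalpha]
              refine band_true.mpr ⟨by simpa using htake_ne, ?_⟩
              rw [all_take_iff]
              intro j hj hj3
              rw [halpha p[j] (List.getElem_mem hj), decide_eq_true_eq]
              exact (hall j hj (Nat.zero_le j)).1 hj3
            · by_cases hde : (p.drop 4).isEmpty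
              · simp [hde]
              · refine bor_true.mpr (Or.inr ?_)
                rw [PySem.Chars.strIsdigit]
                refine band_true.mpr ⟨by simpa using hde, ?_⟩
                rw [all_drop_iff]
                intro j hj hj4
                rw [hdig p[j], decide_eq_true_eq]
                exact (hall j hj (Nat.zero_le j)).2 (by omega)
          · intro hrhs j hj _
            obtain ⟨ha, hd⟩ := band_true.mp hrhs
            refine ⟨fun hj3 => ?_, fun hj3 => ?_⟩
            · have hall := (band_true.mp (by rwa [PySem.Chars.strIsalpha] at ha)).2
              rw [all_take_iff] at hall
              have := hall j hj hj3
              rw [halpha p[j] (List.getElem_mem hj), decide_eq_true_eq] at this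
              exact this
            · have hne : ¬ (p.drop 4).isEmpty = true := by
                simp only [List.isEmpty_iff, ← List.length_eq_zero_iff, List.length_drop]
                omega
              have hsd : PySem.Chars.strIsdigit (p.drop 4) = true := by
                rcases bor_true.mp hd with h | h
                · exact absurd h hne
                · exact h
              have hall := (band_true.mp (by rwa [PySem.Chars.strIsdigit] at hsd)).2
              rw [all_drop_iff] at hall
              have := hall j hj (by omega)
              rw [hdig p[j], decide_eq_true_eq] at this
              exact this
        cases hres : pvLoopA p 0 <;>
          cases hb : (PySem.Chars.strIsalpha (p.take 3)
              && ((p.drop 4).isEmpty || PySem.Chars.strIsdigit (p.drop 4)))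
        · rfl
        · exact absurd (main.mpr hb) (by simp [hres])
        · exact absurd (main.mp hres) (by simp [hb])
        · rfl
      · rw [if_neg hdash, if_pos (by rw [hgetD]; exact Or.inr hdash)]
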